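-- pv_equiv track=rewrite | github.com/LoriGaetani/docling | docling_pipeline.py | _find_repeated_header_block
-- ===== SOURCE A (Python) =====
-- from typing import List, Tuple, Optional, Set, Union
-- from collections import Counter
--
-- def _normalize_line(line: str) -> str:
--     return " ".join(line.split()).strip()
--
-- def _extract_block(lines: List[str], start_idx: int, max_block_size: int = 8) -> Tuple[str, ...]:
--     block: List[str] = []
--     i = start_idx
--     while i < len(lines) and len(block) < max_block_size:
--         norm = _normalize_line(lines[i])
--         if norm == "":
--             break
--         block.append(norm)
--         i += 1
--     return tuple(block)
--
-- def _find_repeated_header_block(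
--     lines: List[str],
--     min_block_size: int = 3,
--     max_block_size: int = 8,
--     min_repetitions: int = 3,
-- ) -> Optional[Tuple[str, ...]]:
--     blocks_counter: Counter[Tuple[str, ...]] = Counter()
--     for start_idx in range(len(lines)):
--         block = _extract_block(lines, start_idx, max_block_size=max_block_size)
--         if len(block) >= min_block_size:
--             blocks_counter[block] += 1
--
--     if not blocks_counter:
--         return None
--
--     block, count = blocks_counter.most_common(1)[0]
--     if count >= min_repetitions:
--         return block
--     return None
-- ===== SOURCE B (Python) =====
-- from typing import List, Optional, Tuple
-- from collections import Counter
--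
-- def _normalize_line(line: str) -> str:
--     return " ".join(line.split()).strip()
--
-- def _find_repeated_header_block(
--     lines: List[str],
--     min_block_size: int = 3,
--     max_block_size: int = 8,
--     min_repetitions: int = 3,
-- ) -> Optional[Tuple[str, ...]]:
--     norm = [_normalize_line(l) for l in lines]
--     # run lengths: runs[i] = number of consecutive non-empty normalized lines starting at i
--     rev_runs = []
--     run = 0
--     for s in reversed(norm):
--         run = 0 if s == "" else run + 1
--         rev_runs.append(run)
--     runs = rev_runs[::-1]
--     counts: Counter = Counter()
--     for i, r in enumerate(runs):
--         k = max(0, min(r, max_block_size))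
--         if k >= min_block_size:
--             counts[tuple(norm[i:i + k])] += 1
--     if not counts:
--         return None
--     block, count = counts.most_common(1)[0]
--     return block if count >= min_repetitions else None
-- ===== Notes on version B (the rewrite author's own statement) =====
-- stated objective: faster
-- what changed: A re-extracts each candidate block with a fresh while loop (_extract_block) from every start index, re-normalizing each line up to max_block_size times; B normalizes every line once, computes the run length of consecutive non-empty lines starting at each index in one back-to-front pass, and reads each block off as a slice of the normalized list.
import Mathlib
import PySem

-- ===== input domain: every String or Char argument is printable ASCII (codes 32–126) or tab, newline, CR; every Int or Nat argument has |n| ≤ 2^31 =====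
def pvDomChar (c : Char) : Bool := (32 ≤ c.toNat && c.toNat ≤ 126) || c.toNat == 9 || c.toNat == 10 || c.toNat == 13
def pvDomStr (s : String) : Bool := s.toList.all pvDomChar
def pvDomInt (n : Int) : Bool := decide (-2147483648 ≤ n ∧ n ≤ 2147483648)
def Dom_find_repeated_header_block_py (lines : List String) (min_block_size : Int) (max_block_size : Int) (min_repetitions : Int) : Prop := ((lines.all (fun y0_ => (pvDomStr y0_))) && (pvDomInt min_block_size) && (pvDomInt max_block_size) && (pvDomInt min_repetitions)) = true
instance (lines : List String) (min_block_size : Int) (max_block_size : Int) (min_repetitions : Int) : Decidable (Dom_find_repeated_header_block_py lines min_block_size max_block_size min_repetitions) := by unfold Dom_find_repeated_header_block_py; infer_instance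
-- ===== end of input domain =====

-- B replaces A's per-start-index rescan (_extract_block's while loop, re-normalizing lines from
-- every start) by one normalization pass plus back-to-front run lengths, then takes each block as
-- a slice; objective: faster (measured).

-- ===== PORT A =====

-- _normalize_line(line) = " ".join(line.split()).strip()   (helper of both Pythons)
def pvNorm (line : String) : String :=
  PySem.Str.strip (PySem.Str.join " " (PySem.Str.split₀ line))

-- most_common(1)[0] of a nonempty items list: stable descending sort by count, so the FIRST
-- item (insertion order) attaining the maximal count; port of the Counter library call both
-- Pythons make.
def pvMostCommon1 (items : List (List String × Int)) : List String × Int :=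
  match items with
  | [] => ([], 0)
  | x :: rest => rest.foldl (fun best kv => if best.2 < kv.2 then kv else best) x

-- the while loop of _extract_block: i, block are the loop state
def pvExtractAux (lines : List String) (maxb : Int) (i : Nat) (block : List String) : List String :=
  if h : i < lines.length ∧ (block.length : Int) < maxb then
    let norm := pvNorm lines[i]
    if norm = "" then block
    else pvExtractAux lines maxb (i + 1) (block ++ [norm])
  else block
termination_by lines.length - i
decreasing_by omega

def pvExtract (lines : List String) (start_idx : Nat) (maxb : Int) : List String :=
  pvExtractAux lines maxb start_idx []

-- body of A's counting loop (blocks_counter[block] += 1 = insert (getD + 1))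
def pvStepA (lines : List String) (max_bs min_bs : Int)
    (d : PySem.Dict (List String) Int) (start_idx : Nat) : PySem.Dict (List String) Int :=
  let block := pvExtract lines start_idx max_bs
  if (block.length : Int) ≥ min_bs then d.insert block (d.getD block 0 + 1) else d

-- the closing lines 'if not blocks_counter: return None' + most_common(1) + min_repetitions
-- test, verbatim identical in Source A and Source B (shared helper like pvNorm)
def pvFinish (counter : PySem.Dict (List String) Int) (min_rep : Int) : Option (List String) :=
  if counter.items = [] then none
  else
    let bc := pvMostCommon1 counter.items
    if bc.2 ≥ min_rep then some bc.1 else none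

def find_repeated_header_block_py (lines : List String) (min_block_size : Int) (max_block_size : Int) (min_repetitions : Int) : Option (List String) :=
  -- for start_idx in range(len(lines)): indices are exactly 0..len-1, always in range
  pvFinish
    ((List.range lines.length).foldl (pvStepA lines max_block_size min_block_size) PySem.Dict.empty)
    min_repetitions

-- ===== PORT B =====

-- run lengths, computed back to front (the reversed loop of Source B is the structural foldr)
def pvRuns (norm : List String) : List Int :=
  norm.foldr
    (fun s rest =>
      (if s = "" then 0 else (match rest with | [] => 0 | r :: _ => r) + 1) :: rest) []

-- body of B's counting loop over enumerate(runs); p = (i, r)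
def pvStepB (norm : List String) (max_bs min_bs : Int)
    (d : PySem.Dict (List String) Int) (p : Int × Int) : PySem.Dict (List String) Int :=
  let k := max 0 (min p.2 max_bs)
  if k ≥ min_bs then
    -- norm[i : i+k] with 0 ≤ i and 0 ≤ k: exactly drop/take
    let block := (norm.drop p.1.toNat).take k.toNat
    d.insert block (d.getD block 0 + 1)
  else d

def find_repeated_header_block_py_alt (lines : List String) (min_block_size : Int) (max_block_size : Int) (min_repetitions : Int) : Option (List String) :=
  let norm := lines.map pvNorm
  pvFinish
    ((PySem.List.enumerate (pvRuns norm)).foldl (pvStepB norm max_block_size min_block_size) PySem.Dict.empty)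
    min_repetitions

-- ===== PRECONDITION & SPEC =====
def Spec_find_repeated_header_block_py (lines : List String) (min_block_size : Int) (max_block_size : Int) (min_repetitions : Int) (out : Option (List String)) : Prop := out = find_repeated_header_block_py_alt lines min_block_size max_block_size min_repetitions
instance (lines : List String) (min_block_size : Int) (max_block_size : Int) (min_repetitions : Int) (out : Option (List String)) : Decidable (Spec_find_repeated_header_block_py lines min_block_size max_block_size min_repetitions out) := by unfold Spec_find_repeated_header_block_py; infer_instance

-- ===== CLAIM (what is proved, stated in full; the proofs are below) =====
def Claim_equal_find_repeated_header_block_py : Prop := ∀ (lines : List String) (min_block_size : Int) (max_block_size : Int) (min_repetitions : Int), Dom_find_repeated_header_block_py lines min_block_size max_block_size min_repetitions → Spec_find_repeated_header_block_py lines min_block_size max_block_size min_repetitions (find_repeated_header_block_py lines min_block_size max_block_size min_repetitions)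

-- ===== LEMMAS AND PROOFS =====

-- leading-run length of a list of (already normalized) lines
def pvRho (l : List String) : Int :=
  match l with
  | [] => 0
  | s :: t => if s = "" then 0 else pvRho t + 1

lemma pvRho_nonneg (l : List String) : 0 ≤ pvRho l := by
  induction l with
  | nil => simp [pvRho]
  | cons s t ih => simp only [pvRho]; split <;> omega

lemma pvRho_le_len (l : List String) : pvRho l ≤ (l.length : Int) := by
  induction l with
  | nil => simp [pvRho]
  | cons s t ih => simp only [pvRho, List.length_cons]; split <;> push_cast <;> omega

-- the prefix A's while loop collects, in functional form
def pvF (l : List String) (m : Int) : List String :=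
  match l with
  | [] => []
  | s :: t => if m ≤ 0 then [] else if s = "" then [] else s :: pvF t (m - 1)

lemma pvF_nonpos (l : List String) (m : Int) (h : m ≤ 0) : pvF l m = [] := by
  cases l with
  | nil => rfl
  | cons s t => simp [pvF, h]

lemma pvF_eq_take (l : List String) (m : Int) :
    pvF l m = l.take (max 0 (min (pvRho l) m)).toNat := by
  induction l generalizing m with
  | nil => simp [pvF]
  | cons s t ih =>
    by_cases hm : m ≤ 0
    · simp [pvF, hm]
    · by_cases hs : s = ""
      · subst hs
        have h0 : pvRho ("" :: t) = 0 := by simp [pvRho]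
        have hk0 : (max 0 (min (pvRho ("" :: t)) m)).toNat = 0 := by omega
        simp only [pvF, if_neg hm, hk0, List.take_zero]
        simp
      · have hρ : pvRho (s :: t) = pvRho t + 1 := by simp [pvRho, hs]
        have ht := pvRho_nonneg t
        have hk : (max 0 (min (pvRho (s :: t)) m)).toNat
            = (max 0 (min (pvRho t) (m - 1))).toNat + 1 := by rw [hρ]; omega
        simp only [pvF, if_neg hm, if_neg hs, hk, List.take_succ_cons]
        rw [ih]

lemma pvExtractAux_eq (fuel : Nat) (lines : List String) (m : Int) (i : Nat) (block : List String)
    (hf : lines.length - i ≤ fuel) :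
    pvExtractAux lines m i block = block ++ pvF ((lines.drop i).map pvNorm) (m - block.length) := by
  induction fuel generalizing i block with
  | zero =>
    have hlen : lines.length ≤ i := by omega
    rw [pvExtractAux]
    have : ¬ (i < lines.length ∧ (block.length : Int) < m) := by omega
    simp [this, List.drop_eq_nil_of_le hlen, pvF]
  | succ fuel ih =>
    rw [pvExtractAux]
    by_cases h : i < lines.length ∧ (block.length : Int) < m
    · have hdrop : lines.drop i = lines[i] :: lines.drop (i + 1) :=
        (List.getElem_cons_drop h.1).symm
      have hmpos : ¬ (m - block.length ≤ 0) := by omega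
      by_cases hs : pvNorm lines[i] = ""
      · simp only [h, and_self, dite_true, if_pos hs, hdrop, List.map_cons, pvF,
          if_neg hmpos, List.append_nil]
      · have := ih (i + 1) (block ++ [pvNorm lines[i]]) (by omega)
        simp only [h, and_self, dite_true, this, hdrop, List.map_cons, pvF,
          if_neg hmpos, if_neg hs, List.length_append, List.length_cons, List.length_nil]
        rw [List.append_assoc]
        simp only [List.cons_append, List.nil_append]
        congr 2
        push_cast
        ring_nf
    · have hnil : pvF ((lines.drop i).map pvNorm) (m - block.length) = [] := by
        rcases (not_and_or.mp h) with h1 | h2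
        · have : lines.drop i = [] := List.drop_eq_nil_of_le (by omega)
          simp [this, pvF]
        · exact pvF_nonpos _ _ (by omega)
      rw [dif_neg h, hnil, List.append_nil]

-- the folded list B iterates: run lengths are exactly pvRho of each suffix
lemma pvRuns_eq (l : List String) :
    pvRuns l = (List.range l.length).map (fun i => pvRho (l.drop i)) := by
  induction l with
  | nil => simp [pvRuns]
  | cons s t ih =>
    have hhead : ∀ rest, rest = pvRuns t →
        (if s = "" then (0 : Int) else (match rest with | [] => 0 | r :: _ => r) + 1)
          = pvRho (s :: t) := by
      intro rest hrest
      by_cases hs : s = ""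
      · simp [hs, pvRho]
      · cases t with
        | nil => simp [hrest, pvRuns, pvRho, hs]
        | cons u v =>
          have : pvRuns (u :: v) = (List.range (u :: v).length).map (fun i => pvRho ((u :: v).drop i)) := ih
          simp only [hrest, this, List.length_cons, List.range_succ_eq_map, List.map_cons, List.drop_zero]
          simp [pvRho, hs]
    have : pvRuns (s :: t) =
        (if s = "" then (0 : Int) else (match pvRuns t with | [] => 0 | r :: _ => r) + 1) :: pvRuns t := by
      simp [pvRuns, List.foldr_cons]
    rw [this, hhead (pvRuns t) rfl, ih, List.length_cons, List.range_succ_eq_map,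
      List.map_cons, List.map_map]
    simp [Function.comp_def]

lemma enumerate_map_range {α : Type} (n : Nat) (f : Nat → α) :
    PySem.List.enumerate ((List.range n).map f) 0
      = (List.range n).map (fun (i : Nat) => ((i : Int), f i)) := by
  induction n with
  | zero => simp
  | succ n ih =>
    rw [List.range_succ, List.map_append, List.map_append, PySem.List.enumerate_append, ih]
    simp [PySem.List.enumerate_cons, PySem.List.enumerate_nil]

-- ===== VERDICT (by name: the statement is the Claim_ definition above) =====
theorem find_repeated_header_block_py_spec : Claim_equal_find_repeated_header_block_py := by
  intro lines min_bs max_bs min_rep _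
  unfold Spec_find_repeated_header_block_py
  show pvFinish ((List.range lines.length).foldl (pvStepA lines max_bs min_bs) PySem.Dict.empty) min_rep
    = pvFinish ((PySem.List.enumerate (pvRuns (lines.map pvNorm))).foldl
        (pvStepB (lines.map pvNorm) max_bs min_bs) PySem.Dict.empty) min_rep
  have hlen : (lines.map pvNorm).length = lines.length := by simp
  rw [pvRuns_eq, hlen, enumerate_map_range, List.foldl_map]
  have hbody : (fun (d : PySem.Dict (List String) Int) (i : Nat) =>
        pvStepB (lines.map pvNorm) max_bs min_bs d ((i : Int), pvRho ((lines.map pvNorm).drop i)))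
      = pvStepA lines max_bs min_bs := by
    funext d i
    have hmap : (lines.drop i).map pvNorm = (lines.map pvNorm).drop i := List.map_drop ..
    have hblock : pvExtract lines i max_bs
        = ((lines.map pvNorm).drop i).take (max 0 (min (pvRho ((lines.map pvNorm).drop i)) max_bs)).toNat := by
      unfold pvExtract
      rw [pvExtractAux_eq (lines.length - i) lines max_bs i [] (le_refl _)]
      simp only [List.length_nil, Nat.cast_zero, Int.sub_zero, List.nil_append]
      rw [hmap, pvF_eq_take]
    have hklen : ((pvExtract lines i max_bs).length : Int)
        = max 0 (min (pvRho ((lines.map pvNorm).drop i)) max_bs) := by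
      rw [hblock, List.length_take]
      have h1 := pvRho_nonneg ((lines.map pvNorm).drop i)
      have h2 := pvRho_le_len ((lines.map pvNorm).drop i)
      omega
    unfold pvStepA pvStepB
    simp only [Int.toNat_natCast, ge_iff_le]
    by_cases hc : min_bs ≤ max 0 (min (pvRho ((lines.map pvNorm).drop i)) max_bs)
    · rw [if_pos hc, if_pos (by rw [hklen]; exact hc), hblock]
    · rw [if_neg hc, if_neg (by rw [hklen]; exact hc)]
  rw [hbody]
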